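-- pv_equiv track=rewrite | github.com/mohammadmozafari/information-retrieval | src/main.py | args_min
-- ===== SOURCE A (Python) =====
-- def args_min(lst):
--     min_value = -1
--     args = []
--     for i, value in enumerate(lst):
--         if value == -1:
--             continue
--         if (min_value == -1) or (value < min_value):
--             min_value = value
--             args = [i]
--         elif value == min_value:
--             args.append(i)
--     return min_value, args
-- ===== SOURCE B (Python) =====
-- def args_min(lst):
--     min_value = min((v for v in lst if v != -1), default=-1)
--     if min_value == -1:
--         return -1, []
--     return min_value, [i for i, v in enumerate(lst) if v == min_value]
-- ===== Notes on version B (the rewrite author's own statement) =====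
-- stated objective: simpler
-- what changed: Replaces A's single intertwined loop that maintains both the running minimum and its index list (with a -1 sentinel and list resets) by a compute-then-scan decomposition: one pass computes the minimum of the non-(-1) values (default -1), a second comprehension collects the indices equal to it.
import Mathlib
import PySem

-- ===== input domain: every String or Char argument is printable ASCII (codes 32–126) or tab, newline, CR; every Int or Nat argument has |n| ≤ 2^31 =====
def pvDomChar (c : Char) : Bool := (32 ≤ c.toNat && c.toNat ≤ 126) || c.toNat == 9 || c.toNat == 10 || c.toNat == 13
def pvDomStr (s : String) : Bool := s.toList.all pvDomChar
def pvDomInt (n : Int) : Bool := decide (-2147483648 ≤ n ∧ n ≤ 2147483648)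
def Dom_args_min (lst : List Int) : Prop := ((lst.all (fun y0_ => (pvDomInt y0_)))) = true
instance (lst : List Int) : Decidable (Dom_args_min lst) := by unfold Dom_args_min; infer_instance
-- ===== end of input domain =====

-- B replaces A's intertwined single-pass min/indices accumulation by a compute-the-min-then-collect-indices decomposition (objective: simpler).

-- ===== PORT A =====
-- loop body of A's for-loop (state = (min_value, args))
def aStep (st : Int × List Int) (p : Int × Int) : Int × List Int :=
  if p.2 = -1 then st
  else if st.1 = -1 ∨ p.2 < st.1 then (p.2, [p.1])
  else if p.2 = st.1 then (st.1, st.2 ++ [p.1])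
  else st

def args_min (lst : List Int) : Int × List Int :=
  (PySem.List.enumerate lst).foldl aStep (-1, [])

-- ===== PORT B =====
def args_min_alt (lst : List Int) : Int × List Int :=
  let m := PySem.List.minD (lst.filter (fun v => v ≠ -1)) (fun x => x) (-1)
  if m = -1 then (-1, [])
  else (m, (PySem.List.enumerate lst).filterMap (fun p => if p.2 = m then some p.1 else none))

-- ===== PRECONDITION & SPEC =====
def Spec_args_min (lst : List Int) (out : Int × List Int) : Prop := out = args_min_alt lst
instance (lst : List Int) (out : Int × List Int) : Decidable (Spec_args_min lst out) := by unfold Spec_args_min; infer_instance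

-- ===== CLAIM (what is proved, stated in full; the proofs are below) =====
def Claim_equal_args_min : Prop := ∀ (lst : List Int), Dom_args_min lst → Spec_args_min lst (args_min lst)

-- ===== LEMMAS AND PROOFS =====

-- minimum of the non-(-1) elements (proof-side structural version of B's first pass)
def fmin : List Int → Option Int
  | [] => none
  | v :: r => if v = -1 then fmin r
              else some (match fmin r with | none => v | some k => min v k)

-- indices (starting at i) of the elements equal to M (proof-side version of B's second pass)
def idxs : List Int → Int → Int → List Int
  | [], _, _ => []
  | v :: r, i, M => if v = M then i :: idxs r (i + 1) M else idxs r (i + 1) M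

theorem fmin_eq (l : List Int) :
    fmin l = PySem.List.min? (l.filter (fun v => v ≠ -1)) (fun x => x) := by
  induction l with
  | nil => rfl
  | cons v r ih =>
    by_cases hv : v = -1
    · simp [fmin, hv, ih]
    · have hfc : (v :: r).filter (fun v => v ≠ -1) = v :: r.filter (fun v => v ≠ -1) := by
        simp [hv]
      rw [hfc, PySem.List.min?_id_cons]
      rw [fmin, if_neg hv, ih]
      cases hfr : PySem.List.min? (r.filter (fun v => v ≠ -1)) (fun x => x) with
      | none =>
        rw [PySem.List.min?_eq_none_iff] at hfr
        rw [hfr]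
        simp
      | some k =>
        cases hl : r.filter (fun v => v ≠ -1) with
        | nil =>
          rw [hl, show PySem.List.min? ([] : List Int) (fun x => x) = none by
            rw [PySem.List.min?_eq_none_iff]] at hfr
          cases hfr
        | cons x t =>
          rw [hl, PySem.List.min?_id_cons] at hfr
          simp only [Option.some.injEq] at hfr ⊢
          rw [← hfr, List.foldl_cons]
          exact (List.foldl_assoc).symm

theorem fmin_ne_neg_one {l : List Int} {k : Int} (h : fmin l = some k) : k ≠ -1 := by
  rw [fmin_eq] at h
  have hk := PySem.List.min?_mem h
  simp only [List.mem_filter, decide_eq_true_eq] at hk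
  exact hk.2

-- result of the tail of A's loop from a state with min_value ≠ -1
theorem run_ne (l : List Int) (i m : Int) (args : List Int) (hm : m ≠ -1) :
    (PySem.List.enumerate l i).foldl aStep (m, args) =
      (let M := match fmin l with | none => m | some k => min m k
       (M, (if M = m then args else []) ++ idxs l i M)) := by
  induction l generalizing i m args with
  | nil => simp [PySem.List.enumerate_nil, fmin, idxs]
  | cons v r ih =>
    rw [PySem.List.enumerate_cons, List.foldl_cons]
    by_cases hv : v = -1
    · subst hv
      have h1 : aStep (m, args) (i, -1) = (m, args) := by simp [aStep]
      rw [h1, ih _ _ _ hm]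
      rw [show fmin (-1 :: r) = fmin r by simp [fmin]]
      cases hfr : fmin r with
      | none => simp [idxs, (show ¬ (-1 : Int) = m by omega)]
      | some k =>
        have hk := fmin_ne_neg_one hfr
        simp [idxs, (show ¬ (-1 : Int) = min m k by omega)]
    · have hstep : aStep (m, args) (i, v) =
          (if m = -1 ∨ v < m then (v, [i])
           else if v = m then (m, args ++ [i]) else (m, args)) := by
        simp [aStep, hv]
      rw [hstep, show fmin (v :: r) =
          some (match fmin r with | none => v | some k => min v k) by rw [fmin, if_neg hv]]
      by_cases hlt : v < m
      · rw [if_pos (Or.inr hlt), ih _ _ _ hv]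
        cases hfr : fmin r with
        | none =>
          simp only [idxs]
          simp [(show min m v = v by omega), (show ¬ v = m by omega)]
        | some k =>
          simp only [idxs]
          have h : min m (min v k) = min v k := by omega
          have h2 : ¬ min v k = m := by omega
          by_cases hvk : v = min v k
          · simp [← hvk, (show ¬ v = m by omega), le_of_lt hlt]
          · simp [h, h2, hvk, (show ¬ min v k = v by omega)]
      · rw [if_neg (by simp [hm, hlt])]
        by_cases hvm : v = m
        · rw [if_pos hvm, ih _ _ _ hm]
          subst hvm
          cases hfr : fmin r with
          | none => simp [idxs]
          | some k =>
            simp only [idxs]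
            have h : min v (min v k) = min v k := by omega
            by_cases hkm : min v k = v
            · simp [hkm]
            · simp [hkm, (show ¬ v = min v k by omega)]
        · rw [if_neg hvm, ih _ _ _ hm]
          cases hfr : fmin r with
          | none => simp [idxs, (show min m v = m by omega), hvm]
          | some k =>
            simp only [idxs]
            have h : min m (min v k) = min m k := by omega
            simp [h, (show ¬ v = min m k by omega)]

-- result of A's loop from the initial state
theorem run_init (l : List Int) (i : Int) :
    (PySem.List.enumerate l i).foldl aStep (-1, []) =
      (match fmin l with | none => ((-1 : Int), ([] : List Int)) | some k => (k, idxs l i k)) := by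
  induction l generalizing i with
  | nil => simp [PySem.List.enumerate_nil, fmin]
  | cons v r ih =>
    rw [PySem.List.enumerate_cons, List.foldl_cons]
    by_cases hv : v = -1
    · subst hv
      have h1 : aStep (-1, []) (i, -1) = (-1, []) := by simp [aStep]
      rw [h1, ih, show fmin (-1 :: r) = fmin r by simp [fmin]]
      cases hfr : fmin r with
      | none => simp
      | some k =>
        have hk := fmin_ne_neg_one hfr
        simp [idxs, (show ¬ (-1 : Int) = k by omega)]
    · have h1 : aStep (-1, []) (i, v) = (v, [i]) := by simp [aStep, hv]
      rw [h1, run_ne _ _ _ _ hv]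
      rw [show fmin (v :: r) =
          some (match fmin r with | none => v | some k => min v k) by rw [fmin, if_neg hv]]
      cases hfr : fmin r with
      | none => simp [idxs]
      | some k =>
        simp only [idxs]
        by_cases hvk : v = min v k
        · simp [← hvk]
        · simp [hvk, (show ¬ min v k = v by omega)]

theorem idxs_eq_filterMap (l : List Int) (i M : Int) :
    (PySem.List.enumerate l i).filterMap
        (fun p => if p.2 = M then some p.1 else none) = idxs l i M := by
  induction l generalizing i with
  | nil => simp [PySem.List.enumerate_nil, idxs]
  | cons v r ih =>
    rw [PySem.List.enumerate_cons, List.filterMap_cons]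
    by_cases hv : v = M <;> simp [hv, idxs, ih]

-- ===== VERDICT (by name: the statement is the Claim_ definition above) =====
theorem args_min_spec : Claim_equal_args_min := by
  intro lst _
  show args_min lst = args_min_alt lst
  unfold args_min args_min_alt
  rw [run_init lst 0]
  simp only [PySem.List.minD, ← fmin_eq]
  cases hf : fmin lst with
  | none => simp
  | some k =>
    have hk := fmin_ne_neg_one hf
    simp only [Option.getD_some]
    rw [if_neg hk, ← idxs_eq_filterMap lst 0 k]
    rfl
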